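-- pv_equiv track=rewrite | github.com/BvilleBigA/gamedaystats | app/gwtapi.py | _derive_balls_strikes_from_sequence
-- ===== SOURCE A (Python) =====
-- def _derive_balls_strikes_from_sequence(raw):
--     """Derive (balls, strikes) from GWT pitch sequence. Returns (balls, strikes) integers."""
--     if not raw or not str(raw).strip():
--         return (None, None)
--     raw = str(raw).strip()
--     b, s = 0, 0
--     if raw and raw[0].isalpha():
--         for c in raw.lower():
--             if c in ('b', 'i'):
--                 b += 1
--             elif c in ('k', 's', 'p'):
--                 s = min(s + 1, 2)
--             elif c == 'f':
--                 if s < 2: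
--                     s += 1
--             elif c in ('x', 'h'):
--                 break
--         return (b, s)
--     for part in raw.split('/'):
--         part = part.strip()
--         if len(part) < 2:
--             continue
--         pfx = part[:2]
--         if pfx in ('01', '06'):
--             b += 1
--         elif pfx in ('02', '03', '08'):
--             s = min(s + 1, 2)
--         elif pfx == '04':
--             if s < 2:
--                 s += 1
--         elif pfx in ('05', '07'):
--             break
--     return (b, s)
-- ===== SOURCE B (Python) =====
-- def _derive_balls_strikes_from_sequence(raw):
--     """Derive (balls, strikes): find the truncation point first, then count tokens."""
--     if not raw or not str(raw).strip():
--         return (None, None)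
--     seq = str(raw).strip()
--     if seq[0].isalpha():
--         toks = list(seq.lower())
--         kept = toks[:next((i for i, c in enumerate(toks) if c in ('x', 'h')), len(toks))]
--         balls = sum(1 for c in kept if c in ('b', 'i'))
--         strikes = sum(1 for c in kept if c in ('k', 's', 'p', 'f'))
--     else:
--         toks = [p.strip()[:2] for p in seq.split('/') if len(p.strip()) >= 2]
--         kept = toks[:next((i for i, p in enumerate(toks) if p in ('05', '07')), len(toks))]
--         balls = sum(1 for p in kept if p in ('01', '06'))
--         strikes = sum(1 for p in kept if p in ('02', '03', '08', '04'))
--     return (balls, min(strikes, 2))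
-- ===== Notes on version B (the rewrite author's own statement) =====
-- stated objective: alternative
-- what changed: Replaces A's single accumulating loop with capped-in-loop strike arithmetic by: locate the truncation point ('x'/'h' or '05'/'07') first, slice the token list there, then count ball and strike tokens separately and cap strikes once with min(strikes,2) outside any loop.
import Mathlib
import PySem

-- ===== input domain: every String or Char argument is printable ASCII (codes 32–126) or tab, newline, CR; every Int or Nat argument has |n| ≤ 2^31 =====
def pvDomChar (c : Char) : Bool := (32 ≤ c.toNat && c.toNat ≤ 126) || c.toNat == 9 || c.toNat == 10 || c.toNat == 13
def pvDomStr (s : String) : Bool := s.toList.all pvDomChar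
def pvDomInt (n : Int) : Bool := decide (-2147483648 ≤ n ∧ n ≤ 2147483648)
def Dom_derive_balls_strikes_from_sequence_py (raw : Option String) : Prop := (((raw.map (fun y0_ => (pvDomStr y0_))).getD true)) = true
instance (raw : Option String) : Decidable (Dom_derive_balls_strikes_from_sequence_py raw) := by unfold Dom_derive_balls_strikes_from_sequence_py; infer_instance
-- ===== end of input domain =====

-- B locates the truncation point first, slices the token list there, then counts ball
-- and strike tokens separately, capping strikes once at the end; A accumulates both
-- counts in a single loop, capping strikes inside the loop. Same return value.

-- ===== PORT A =====
-- the alpha-sequence loop of A (break on 'x'/'h')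
def pvAAlphaLoop : List Char → Int → Int → Int × Int
  | [], b, s => (b, s)
  | c :: rest, b, s =>
    if c = 'b' ∨ c = 'i' then pvAAlphaLoop rest (b + 1) s
    else if c = 'k' ∨ c = 's' ∨ c = 'p' then pvAAlphaLoop rest b (min (s + 1) 2)
    else if c = 'f' then pvAAlphaLoop rest b (if s < 2 then s + 1 else s)
    else if c = 'x' ∨ c = 'h' then (b, s)
    else pvAAlphaLoop rest b s

-- the numeric-sequence loop of A over the '/'-separated parts (break on '05'/'07')
def pvANumLoop : List (List Char) → Int → Int → Int × Int
  | [], b, s => (b, s)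
  | p :: rest, b, s =>
    let part := PySem.Chars.strip p
    if part.length < 2 then pvANumLoop rest b s
    else
      let pfx := PySem.List.slice part none (some 2)
      if pfx = ['0','1'] ∨ pfx = ['0','6'] then pvANumLoop rest (b + 1) s
      else if pfx = ['0','2'] ∨ pfx = ['0','3'] ∨ pfx = ['0','8'] then pvANumLoop rest b (min (s + 1) 2)
      else if pfx = ['0','4'] then pvANumLoop rest b (if s < 2 then s + 1 else s)
      else if pfx = ['0','5'] ∨ pfx = ['0','7'] then (b, s)
      else pvANumLoop rest b s

def derive_balls_strikes_from_sequence_py (raw : Option String) : Option Int × Option Int :=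
  match raw with
  | none => (none, none)
  | some r =>
    if r.toList = [] ∨ PySem.Chars.strip r.toList = [] then (none, none)
    else
      let cs := PySem.Chars.strip r.toList
      if (match cs with | c :: _ => PySem.Chars.isalpha c | [] => false) then
        let (b, s) := pvAAlphaLoop (PySem.Chars.lower cs) 0 0
        (some b, some s)
      else
        let (b, s) := pvANumLoop (PySem.Chars.splitOn cs ['/']) 0 0
        (some b, some s)

-- ===== PORT B =====
def pvBallTokA (c : Char) : Bool := c = 'b' || c = 'i'
def pvStrikeTokA (c : Char) : Bool := c = 'k' || c = 's' || c = 'p' || c = 'f'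
def pvBrkA (c : Char) : Bool := c = 'x' || c = 'h'
def pvBallTokN (p : List Char) : Bool := p = ['0','1'] || p = ['0','6']
def pvStrikeTokN (p : List Char) : Bool := p = ['0','2'] || p = ['0','3'] || p = ['0','8'] || p = ['0','4']
def pvBrkN (p : List Char) : Bool := p = ['0','5'] || p = ['0','7']

-- B's token extraction: p.strip()[:2] for parts of stripped length ≥ 2, else dropped
def pvTok (p : List Char) : Option (List Char) :=
  let q := PySem.Chars.strip p
  if 2 ≤ q.length then some (q.take 2) else none

def derive_balls_strikes_from_sequence_py_alt (raw : Option String) : Option Int × Option Int :=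
  match raw with
  | none => (none, none)
  | some r =>
    let cs := PySem.Chars.strip r.toList
    if cs = [] then (none, none)
    else if (match cs with | c :: _ => PySem.Chars.isalpha c | [] => false) then
      let toks := PySem.Chars.lower cs
      let kept := toks.take (toks.findIdx pvBrkA)
      (some ((kept.countP pvBallTokA : Nat) : Int),
       some (min ((kept.countP pvStrikeTokA : Nat) : Int) 2))
    else
      let toks := (PySem.Chars.splitOn cs ['/']).filterMap pvTok
      let kept := toks.take (toks.findIdx pvBrkN)
      (some ((kept.countP pvBallTokN : Nat) : Int),
       some (min ((kept.countP pvStrikeTokN : Nat) : Int) 2))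

-- ===== PRECONDITION & SPEC =====
def Spec_derive_balls_strikes_from_sequence_py (raw : Option String) (out : Option Int × Option Int) : Prop := out = derive_balls_strikes_from_sequence_py_alt raw
instance (raw : Option String) (out : Option Int × Option Int) : Decidable (Spec_derive_balls_strikes_from_sequence_py raw out) := by unfold Spec_derive_balls_strikes_from_sequence_py; infer_instance

-- ===== CLAIM (what is proved, stated in full; the proofs are below) =====
def Claim_equal_derive_balls_strikes_from_sequence_py : Prop := ∀ (raw : Option String), Dom_derive_balls_strikes_from_sequence_py raw → Spec_derive_balls_strikes_from_sequence_py raw (derive_balls_strikes_from_sequence_py raw)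

-- ===== LEMMAS AND PROOFS =====
lemma pvAAlphaLoop_eq (cs : List Char) (b s : Int) (h0 : 0 ≤ s) (h2 : s ≤ 2) :
    pvAAlphaLoop cs b s =
      (b + ((cs.take (cs.findIdx pvBrkA)).countP pvBallTokA : Nat),
       min (s + ((cs.take (cs.findIdx pvBrkA)).countP pvStrikeTokA : Nat)) 2) := by
  induction cs generalizing b s with
  | nil => simp [pvAAlphaLoop]; omega
  | cons c rest ih =>
    by_cases hb : c = 'b' ∨ c = 'i'
    · have h1 : pvBrkA c = false := by rcases hb with h|h <;> subst h <;> decide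
      have h2' : pvBallTokA c = true := by rcases hb with h|h <;> subst h <;> decide
      have h3 : pvStrikeTokA c = false := by rcases hb with h|h <;> subst h <;> decide
      simp [pvAAlphaLoop, hb, List.findIdx_cons, h1, h2', h3, ih (b+1) s h0 h2]
      omega
    · by_cases hk : c = 'k' ∨ c = 's' ∨ c = 'p'
      · have h1 : pvBrkA c = false := by rcases hk with h|h|h <;> subst h <;> decide
        have h2' : pvBallTokA c = false := by rcases hk with h|h|h <;> subst h <;> decide
        have h3 : pvStrikeTokA c = true := by rcases hk with h|h|h <;> subst h <;> decide
        simp [pvAAlphaLoop, hb, hk, List.findIdx_cons, h1, h2', h3,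
          ih b (min (s+1) 2) (by omega) (by omega)]
        omega
      · by_cases hf : c = 'f'
        · subst hf
          simp [pvAAlphaLoop, hb, hk, List.findIdx_cons, pvBrkA, pvBallTokA, pvStrikeTokA,
            List.countP_cons]
          split_ifs with hs
          · rw [ih b (s + 1) (by omega) (by omega)]
            simp only [Prod.mk.injEq]
            exact ⟨trivial, by omega⟩
          · rw [ih b s h0 h2]
            simp only [Prod.mk.injEq]
            exact ⟨trivial, by omega⟩
        · by_cases hx : c = 'x' ∨ c = 'h'
          · have h1 : pvBrkA c = true := by rcases hx with h|h <;> subst h <;> decide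
            simp [pvAAlphaLoop, hb, hk, hf, hx, List.findIdx_cons, h1]
            omega
          · have h1 : pvBrkA c = false := by simp [pvBrkA]; tauto
            have h2' : pvBallTokA c = false := by simp [pvBallTokA]; tauto
            have h3 : pvStrikeTokA c = false := by simp [pvStrikeTokA]; tauto
            simp [pvAAlphaLoop, hb, hk, hf, hx, List.findIdx_cons, h1, h2', h3,
              ih b s h0 h2]

lemma pvANumLoop_eq (ps : List (List Char)) (b s : Int) (h0 : 0 ≤ s) (h2 : s ≤ 2) :
    pvANumLoop ps b s =
      (let toks := ps.filterMap pvTok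
       let kept := toks.take (toks.findIdx pvBrkN)
       (b + (kept.countP pvBallTokN : Nat),
        min (s + (kept.countP pvStrikeTokN : Nat)) 2)) := by
  induction ps generalizing b s with
  | nil => simp [pvANumLoop]; omega
  | cons p rest ih =>
    by_cases hlen : (PySem.Chars.strip p).length < 2
    · have ht : pvTok p = none := by simp [pvTok]; omega
      simp only [pvANumLoop, if_pos hlen, List.filterMap_cons, ht]
      exact ih b s h0 h2
    · have hsl : PySem.List.slice (PySem.Chars.strip p) none (some 2) = (PySem.Chars.strip p).take 2 := by
        rw [PySem.List.slice_to _ (by omega)]; rfl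
      have ht : pvTok p = some ((PySem.Chars.strip p).take 2) := by simp [pvTok]; omega
      simp only [pvANumLoop, if_neg hlen, hsl, List.filterMap_cons, ht]
      generalize hq : (PySem.Chars.strip p).take 2 = pfx
      by_cases hb : pfx = ['0','1'] ∨ pfx = ['0','6']
      · have h1 : pvBrkN pfx = false := by rcases hb with h|h <;> subst h <;> decide
        have h2' : pvBallTokN pfx = true := by rcases hb with h|h <;> subst h <;> decide
        have h3 : pvStrikeTokN pfx = false := by rcases hb with h|h <;> subst h <;> decide
        simp only [if_pos hb, List.findIdx_cons, h1, cond_false, List.take_succ_cons,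
          List.countP_cons, h2', h3]
        rw [ih (b + 1) s h0 h2]
        simp only [Prod.mk.injEq]
        exact ⟨by push_cast; omega, by simp⟩
      · by_cases hk : pfx = ['0','2'] ∨ pfx = ['0','3'] ∨ pfx = ['0','8']
        · have h1 : pvBrkN pfx = false := by rcases hk with h|h|h <;> subst h <;> decide
          have h2' : pvBallTokN pfx = false := by rcases hk with h|h|h <;> subst h <;> decide
          have h3 : pvStrikeTokN pfx = true := by rcases hk with h|h|h <;> subst h <;> decide
          simp only [if_neg hb, if_pos hk, List.findIdx_cons, h1, cond_false, List.take_succ_cons,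
            List.countP_cons, h2', h3]
          rw [ih b (min (s + 1) 2) (by omega) (by omega)]
          simp only [Prod.mk.injEq]
          exact ⟨by simp, by push_cast; omega⟩
        · by_cases hf : pfx = ['0','4']
          · subst hf
            have h1 : pvBrkN ['0','4'] = false := by decide
            have h2' : pvBallTokN ['0','4'] = false := by decide
            have h3 : pvStrikeTokN ['0','4'] = true := by decide
            simp only [if_neg hb, if_neg hk, eq_self_iff_true, if_true, List.findIdx_cons, h1,
              cond_false, List.take_succ_cons, List.countP_cons, h2', h3, Bool.false_eq_true,
              if_false, add_zero]
            split_ifs with hs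
            · rw [ih b (s + 1) (by omega) (by omega)]
              simp only [Prod.mk.injEq]
              exact ⟨trivial, by push_cast; omega⟩
            · rw [ih b s h0 h2]
              simp only [Prod.mk.injEq]
              exact ⟨trivial, by push_cast; omega⟩
          · by_cases hx : pfx = ['0','5'] ∨ pfx = ['0','7']
            · have h1 : pvBrkN pfx = true := by rcases hx with h|h <;> subst h <;> decide
              simp only [if_neg hb, if_neg hk, if_neg hf, if_pos hx, List.findIdx_cons, h1,
                cond_true, List.take_zero, List.countP_nil]
              simp only [Prod.mk.injEq]
              exact ⟨by simp, by simp; omega⟩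
            · have h1 : pvBrkN pfx = false := by simp [pvBrkN]; tauto
              have h2' : pvBallTokN pfx = false := by simp [pvBallTokN]; tauto
              have h3 : pvStrikeTokN pfx = false := by simp [pvStrikeTokN]; tauto
              simp only [if_neg hb, if_neg hk, if_neg hf, if_neg hx, List.findIdx_cons, h1,
                cond_false, List.take_succ_cons, List.countP_cons, h2', h3]
              rw [ih b s h0 h2]
              simp

lemma pv_strip_nil : PySem.Chars.strip ([] : List Char) = [] := by decide

-- ===== VERDICT (by name: the statement is the Claim_ definition above) =====
theorem derive_balls_strikes_from_sequence_py_spec : Claim_equal_derive_balls_strikes_from_sequence_py := by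
  intro raw _
  unfold Spec_derive_balls_strikes_from_sequence_py
  cases raw with
  | none => rfl
  | some r =>
    simp only [derive_balls_strikes_from_sequence_py, derive_balls_strikes_from_sequence_py_alt]
    by_cases he : PySem.Chars.strip r.toList = []
    · simp [he]
    · have hne : ¬(r.toList = [] ∨ PySem.Chars.strip r.toList = []) := by
        rintro (h | h)
        · exact he (by rw [h]; exact pv_strip_nil)
        · exact he h
      rw [if_neg hne, if_neg he]
      cases halpha : (match PySem.Chars.strip r.toList with
          | c :: _ => PySem.Chars.isalpha c | [] => false) with
      | true =>
        rw [pvAAlphaLoop_eq _ 0 0 (by omega) (by omega)]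
        simp
      | false =>
        rw [pvANumLoop_eq _ 0 0 (by omega) (by omega)]
        simp
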